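-- pv_equiv track=rewrite | github.com/Rduanchen/NTUTProgramingCourse | 022_MatrixTransform.py | getOriginalIndex
-- ===== SOURCE A (Python) =====
-- def transform(row, col, op, level):
--     match op:
--         case "R":
--             return col, level - row + 1
--         case "L":
--             return level - col + 1, row
--         case "V":
--             return level - row + 1, col
--         case "H":
--             return row, level - col + 1
--     return row, col
--
-- def getOriginalIndex(row, col, ops, level):
--     for op in reversed(ops):
--         match op:
--             case "R":
--                 row, col = transform(row, col, "L", level)
--             case "L":
--                 row, col = transform(row, col, "R", level)
--             case "V":
--                 row, col = transform(row, col, "V", level)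
--             case "H":
--                 row, col = transform(row, col, "H", level)
--     return row, col
-- ===== SOURCE B (Python) =====
-- def getOriginalIndex(row, col, ops, level):
--     # accumulate a single affine map (r,c) -> (a*r + b*c + e, p*r + d*c + f)
--     a, b, e = 1, 0, 0
--     p, d, f = 0, 1, 0
--     for op in reversed(ops):
--         if op == "R":
--             ma, mb, me, mp, md, mf = 0, -1, level + 1, 1, 0, 0
--         elif op == "L":
--             ma, mb, me, mp, md, mf = 0, 1, 0, -1, 0, level + 1
--         elif op == "V":
--             ma, mb, me, mp, md, mf = -1, 0, level + 1, 0, 1, 0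
--         elif op == "H":
--             ma, mb, me, mp, md, mf = 1, 0, 0, 0, -1, level + 1
--         else:
--             ma, mb, me, mp, md, mf = 1, 0, 0, 0, 1, 0
--         a, b, e, p, d, f = (ma * a + mb * p, ma * b + mb * d, ma * e + mb * f + me,
--                             mp * a + md * p, mp * b + md * d, mp * e + md * f + mf)
--     return a * row + b * col + e, p * row + d * col + f
-- ===== Notes on version B (the rewrite author's own statement) =====
-- stated objective: alternative
-- what changed: B maintains a composed 2x2 affine transformation (matrix + translation) over the reversed op list and applies it once to (row, col), instead of transforming the live coordinates at every step.
import Mathlib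
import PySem

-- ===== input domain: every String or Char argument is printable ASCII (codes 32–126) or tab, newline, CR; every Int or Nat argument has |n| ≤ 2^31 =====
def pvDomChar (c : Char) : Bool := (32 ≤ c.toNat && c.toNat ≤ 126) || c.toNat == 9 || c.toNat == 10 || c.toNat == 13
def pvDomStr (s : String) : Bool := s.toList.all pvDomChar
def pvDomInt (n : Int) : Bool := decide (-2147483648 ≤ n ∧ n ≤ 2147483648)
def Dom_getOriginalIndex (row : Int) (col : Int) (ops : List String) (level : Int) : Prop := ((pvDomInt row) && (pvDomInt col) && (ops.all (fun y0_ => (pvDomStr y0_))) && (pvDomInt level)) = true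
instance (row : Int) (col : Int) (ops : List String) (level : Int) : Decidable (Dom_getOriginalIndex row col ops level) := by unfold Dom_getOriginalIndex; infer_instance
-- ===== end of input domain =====

-- B maintains a composed affine map (matrix + translation) and applies it once; A transforms the live coordinates.

-- ===== PORT A =====
def transform (row : Int) (col : Int) (op : String) (level : Int) : Int × Int :=
  if op = "R" then (col, level - row + 1)
  else if op = "L" then (level - col + 1, row)
  else if op = "V" then (level - row + 1, col)
  else if op = "H" then (row, level - col + 1)
  else (row, col)

def getOriginalIndex (row : Int) (col : Int) (ops : List String) (level : Int) : Int × Int :=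
  ops.reverse.foldl (fun rc op =>
    if op = "R" then transform rc.1 rc.2 "L" level
    else if op = "L" then transform rc.1 rc.2 "R" level
    else if op = "V" then transform rc.1 rc.2 "V" level
    else if op = "H" then transform rc.1 rc.2 "H" level
    else rc) (row, col)

-- ===== PORT B =====
-- coefficients (ga, gb, ge, gc, gd, gf) of the inverse affine map of one op
def opCoeffs (op : String) (level : Int) : Int × Int × Int × Int × Int × Int :=
  if op = "R" then (0, -1, level + 1, 1, 0, 0)
  else if op = "L" then (0, 1, 0, -1, 0, level + 1)
  else if op = "V" then (-1, 0, level + 1, 0, 1, 0)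
  else if op = "H" then (1, 0, 0, 0, -1, level + 1)
  else (1, 0, 0, 0, 1, 0)

-- compose g after the accumulated map (a, b, e, c, d, f)
def composeStep (m : Int × Int × Int × Int × Int × Int) (op : String) (level : Int) :
    Int × Int × Int × Int × Int × Int :=
  let (a, b, e, c, d, f) := m
  let (ga, gb, ge, gc, gd, gf) := opCoeffs op level
  (ga * a + gb * c, ga * b + gb * d, ga * e + gb * f + ge,
   gc * a + gd * c, gc * b + gd * d, gc * e + gd * f + gf)

def getOriginalIndex_alt (row : Int) (col : Int) (ops : List String) (level : Int) : Int × Int :=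
  let m := ops.reverse.foldl (fun m op => composeStep m op level) (1, 0, 0, 0, 1, 0)
  let (a, b, e, c, d, f) := m
  (a * row + b * col + e, c * row + d * col + f)

-- ===== PRECONDITION & SPEC =====
def Spec_getOriginalIndex (row : Int) (col : Int) (ops : List String) (level : Int) (out : Int × Int) : Prop := out = getOriginalIndex_alt row col ops level
instance (row : Int) (col : Int) (ops : List String) (level : Int) (out : Int × Int) : Decidable (Spec_getOriginalIndex row col ops level out) := by unfold Spec_getOriginalIndex; infer_instance

-- ===== CLAIM (what is proved, stated in full; the proofs are below) =====
def Claim_equal_getOriginalIndex : Prop := ∀ (row : Int) (col : Int) (ops : List String) (level : Int), Dom_getOriginalIndex row col ops level → Spec_getOriginalIndex row col ops level (getOriginalIndex row col ops level)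

-- ===== LEMMAS AND PROOFS =====
def applyAff (m : Int × Int × Int × Int × Int × Int) (row col : Int) : Int × Int :=
  let (a, b, e, c, d, f) := m
  (a * row + b * col + e, c * row + d * col + f)

def stepA (level : Int) (rc : Int × Int) (op : String) : Int × Int :=
  if op = "R" then transform rc.1 rc.2 "L" level
  else if op = "L" then transform rc.1 rc.2 "R" level
  else if op = "V" then transform rc.1 rc.2 "V" level
  else if op = "H" then transform rc.1 rc.2 "H" level
  else rc

lemma applyAff_composeStep (m : Int × Int × Int × Int × Int × Int) (op : String)
    (level row col : Int) :
    applyAff (composeStep m op level) row col = stepA level (applyAff m row col) op := by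
  obtain ⟨a, b, e, c, d, f⟩ := m
  simp only [composeStep, opCoeffs, applyAff, stepA, transform]
  split_ifs <;>
    first
      | exact absurd (by assumption) (by decide)
      | rfl
      | (simp only [Prod.mk.injEq]; exact ⟨by ring, by ring⟩)

lemma foldl_affine (l : List String) (m : Int × Int × Int × Int × Int × Int)
    (level row col : Int) :
    applyAff (l.foldl (fun m op => composeStep m op level) m) row col =
      l.foldl (stepA level) (applyAff m row col) := by
  induction l generalizing m with
  | nil => rfl
  | cons op rest ih =>
      simp only [List.foldl_cons, ih, applyAff_composeStep]

-- ===== VERDICT (by name: the statement is the Claim_ definition above) =====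
theorem getOriginalIndex_spec : Claim_equal_getOriginalIndex := by
  intro row col ops level _
  unfold Spec_getOriginalIndex getOriginalIndex getOriginalIndex_alt
  have h := foldl_affine ops.reverse (1, 0, 0, 0, 1, 0) level row col
  simp only [applyAff, one_mul, zero_mul, add_zero, zero_add] at h
  exact h.symm
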